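-- pv_equiv track=rewrite | github.com/Vatsakala/optimized-5G-resource-allocation-for-metaverse-application | minor_project_updated.py | distribute_ice_creams_with_priority
-- ===== SOURCE A (Python) =====
-- import heapq
--
-- def distribute_ice_creams_with_priority(total_ice_creams, num_users, priorities):
--     # Create a priority queue using a min-heap
--     priority_queue = [(priority, i) for i, priority in enumerate(priorities)]
--     heapq.heapify(priority_queue)
--
--     # Calculate the base amount of ice creams each user gets
--     base_ice_creams = total_ice_creams // num_users
--
--     # Calculate the remaining ice creams after even distribution
--     remaining_ice_creams = total_ice_creams % num_users
--
--     # Create a list to store the number of ice creams assigned to each user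
--     ice_creams_per_user = [base_ice_creams] * num_users
--
--     # Assign any remaining ice creams to users based on their priorities
--     for _ in range(remaining_ice_creams):
--         _, user_index = heapq.heappop(priority_queue)
--         ice_creams_per_user[user_index] += 1
--
--     return ice_creams_per_user
-- ===== SOURCE B (Python) =====
-- def distribute_ice_creams_with_priority(total_ice_creams, num_users, priorities):
--     # One even share for everyone; the leftovers go to the users whose
--     # (priority, index) pairs are the smallest -- computed by a single sort
--     # and a slice instead of heapify + repeated heappop, then the answer is
--     # produced pointwise by a membership test (no in-place increments).
--     base, rem = divmod(total_ice_creams, num_users)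
--     order = sorted(zip(priorities, range(len(priorities))))
--     chosen = set(idx for _, idx in order[:rem])
--     return [base + (i in chosen) for i in range(num_users)]
-- ===== Notes on version B (the rewrite author's own statement) =====
-- stated objective: alternative
-- what changed: Replaces heapify plus a heappop-and-increment loop over a mutable result list with one sort of the (priority, index) pairs, a slice giving the set of winning indices, and a pointwise comprehension that builds the result by a membership test.
import Mathlib
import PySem

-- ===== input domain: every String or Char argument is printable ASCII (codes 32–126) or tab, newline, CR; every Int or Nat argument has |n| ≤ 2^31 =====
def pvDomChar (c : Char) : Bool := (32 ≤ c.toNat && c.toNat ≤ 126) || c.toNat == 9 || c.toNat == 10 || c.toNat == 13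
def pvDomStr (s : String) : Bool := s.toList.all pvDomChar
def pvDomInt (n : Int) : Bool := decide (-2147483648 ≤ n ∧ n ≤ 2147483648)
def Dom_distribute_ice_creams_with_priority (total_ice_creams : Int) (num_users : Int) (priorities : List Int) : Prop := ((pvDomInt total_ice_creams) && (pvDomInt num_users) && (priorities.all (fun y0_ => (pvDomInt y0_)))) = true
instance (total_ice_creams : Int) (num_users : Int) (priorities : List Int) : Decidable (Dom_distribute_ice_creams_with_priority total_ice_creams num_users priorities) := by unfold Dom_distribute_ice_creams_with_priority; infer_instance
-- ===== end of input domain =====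

-- B replaces heapify + a heappop/increment loop over a mutable list by sort-slice-membership; equal value wherever A returns (objective: alternative).

-- ===== PORT A =====
-- heapq.heapify / heapq.heappop are ported by their library semantics: heappop returns
-- the lexicographically smallest (priority, index) pair — unique here, since no two
-- pairs compare equal (indices are distinct) — and removes it.  On an empty heap Python
-- raises IndexError, and an out-of-range list index raises IndexError too; both are
-- excluded by Pre_, and there the port just keeps the state / list unchanged.
def pvPopStep (st : List (Int × Int) × List Int) (_ : Int) : List (Int × Int) × List Int :=
  match PySem.List.min2? st.1 (fun q => q.1) (fun q => q.2) with
  | none => st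
  | some m => (st.1.erase m, PySem.List.pySetD st.2 m.2 (PySem.List.pyGetD st.2 m.2 0 + 1))

def distribute_ice_creams_with_priority (total_ice_creams : Int) (num_users : Int) (priorities : List Int) : List Int :=
  let priority_queue := (PySem.List.enumerate priorities 0).map (fun ip => (ip.2, ip.1))
  let base_ice_creams := PySem.Int.floordiv total_ice_creams num_users
  let remaining_ice_creams := PySem.Int.mod total_ice_creams num_users
  let ice_creams_per_user := PySem.List.pyRepeat [base_ice_creams] num_users
  ((PySem.List.pyRange 0 remaining_ice_creams 1).foldl pvPopStep (priority_queue, ice_creams_per_user)).2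

-- ===== PORT B =====
def distribute_ice_creams_with_priority_alt (total_ice_creams : Int) (num_users : Int) (priorities : List Int) : List Int :=
  match PySem.Int.divmod? total_ice_creams num_users with
  | none => []  -- ZeroDivisionError (outside Pre_)
  | some br =>
    let order := PySem.List.sorted2 (priorities.zip (PySem.List.pyRange 0 (priorities.length : Int) 1)) (fun q => q.1) (fun q => q.2)
    let chosen : PySem.Set Int := PySem.Set.ofList ((PySem.List.slice order none (some br.2)).map (fun q => q.2))
    (PySem.List.pyRange 0 num_users 1).map (fun i => if PySem.Set.contains chosen i then br.1 + 1 else br.1)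

-- ===== PRECONDITION & SPEC =====
-- Python's strict lexicographic order on (priority, index) tuples (used only to STATE Pre_).
def pvLexLt (a b : Int × Int) : Bool := decide (a.1 < b.1) || (!decide (b.1 < a.1) && decide (a.2 < b.2))

-- A raises iff num_users = 0 (ZeroDivisionError), or num_users > 0 and the leftover count
-- exceeds the heap size (IndexError on heappop from an empty heap), or one of the
-- leftover-count lexicographically smallest (priority, index) pairs has index ≥ num_users
-- (IndexError on the result list); Pre_ excludes exactly those inputs — it admits every
-- input on which A returns.
def Pre_distribute_ice_creams_with_priority (total_ice_creams : Int) (num_users : Int) (priorities : List Int) : Prop :=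
  num_users ≠ 0 ∧ (0 < num_users →
    PySem.Int.mod total_ice_creams num_users ≤ (priorities.length : Int) ∧
    ∀ q ∈ priorities.zip (PySem.List.pyRange 0 (priorities.length : Int) 1), num_users ≤ q.2 →
      PySem.Int.mod total_ice_creams num_users ≤
        ((priorities.zip (PySem.List.pyRange 0 (priorities.length : Int) 1)).countP (fun q' => pvLexLt q' q) : Int))
instance (total_ice_creams : Int) (num_users : Int) (priorities : List Int) : Decidable (Pre_distribute_ice_creams_with_priority total_ice_creams num_users priorities) := by unfold Pre_distribute_ice_creams_with_priority; infer_instance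

def pvWitness_distribute_ice_creams_with_priority : Int × Int × List Int := (7, 3, [5, 2, 9])

def Spec_distribute_ice_creams_with_priority (total_ice_creams : Int) (num_users : Int) (priorities : List Int) (out : List Int) : Prop := out = distribute_ice_creams_with_priority_alt total_ice_creams num_users priorities
instance (total_ice_creams : Int) (num_users : Int) (priorities : List Int) (out : List Int) : Decidable (Spec_distribute_ice_creams_with_priority total_ice_creams num_users priorities out) := by unfold Spec_distribute_ice_creams_with_priority; infer_instance

-- ===== CLAIM (what is proved, stated in full; the proofs are below) =====
def Claim_equal_distribute_ice_creams_with_priority : Prop := ∀ (total_ice_creams : Int) (num_users : Int) (priorities : List Int), Dom_distribute_ice_creams_with_priority total_ice_creams num_users priorities → Pre_distribute_ice_creams_with_priority total_ice_creams num_users priorities → Spec_distribute_ice_creams_with_priority total_ice_creams num_users priorities (distribute_ice_creams_with_priority total_ice_creams num_users priorities)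

-- ===== LEMMAS AND PROOFS =====

-- basic order facts about pvLexLt (a strict linear order on Int × Int)
theorem pvLexLt_irrefl (a : Int × Int) : pvLexLt a a = false := by simp [pvLexLt]

theorem pvLexLt_asymm {a b : Int × Int} (h : pvLexLt a b = true) : pvLexLt b a = false := by
  simp only [pvLexLt, Bool.or_eq_true, Bool.and_eq_true, Bool.not_eq_true',
    decide_eq_true_eq, decide_eq_false_iff_not, Bool.or_eq_false_iff, Bool.and_eq_false_iff,
    Bool.not_eq_false'] at *
  omega

theorem pvLexLt_trans {a b c : Int × Int} (h1 : pvLexLt a b = true) (h2 : pvLexLt b c = true) :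
    pvLexLt a c = true := by
  simp only [pvLexLt, Bool.or_eq_true, Bool.and_eq_true, Bool.not_eq_true',
    decide_eq_true_eq, decide_eq_false_iff_not] at *
  omega

theorem pvLexLt_total {a b : Int × Int} (h : a ≠ b) : pvLexLt a b = true ∨ pvLexLt b a = true := by
  rcases a with ⟨a1, a2⟩; rcases b with ⟨b1, b2⟩
  simp only [ne_eq, Prod.mk.injEq, not_and] at h
  simp only [pvLexLt, Bool.or_eq_true, Bool.and_eq_true, Bool.not_eq_true',
    decide_eq_true_eq, decide_eq_false_iff_not]
  by_cases h1 : a1 = b1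
  · subst h1; have := h rfl; omega
  · omega

theorem pvLexLt_antisymm {a b : Int × Int} (h1 : pvLexLt a b = false) (h2 : pvLexLt b a = false) :
    a = b := by
  by_contra hne
  rcases pvLexLt_total hne with h | h <;> simp_all

-- sorted2 / min2? with these keys, written with pvLexLt
def pvSortList (xs : List (Int × Int)) : List (Int × Int) :=
  xs.foldl (fun acc x => PySem.List.insertBy pvLexLt x acc) []

theorem sorted2_eq_pvSortList (xs : List (Int × Int)) :
    PySem.List.sorted2 xs (fun q => q.1) (fun q => q.2) = pvSortList xs := rfl

theorem insertBy_perm (x : Int × Int) (ys : List (Int × Int)) :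
    (PySem.List.insertBy pvLexLt x ys).Perm (x :: ys) := by
  induction ys with
  | nil => simp [PySem.List.insertBy]
  | cons y ys ih =>
    by_cases h : pvLexLt x y = true
    · simp [PySem.List.insertBy, h]
    · simp only [PySem.List.insertBy, h, if_false, Bool.false_eq_true]
      exact List.Perm.trans (ih.cons y) (List.Perm.swap x y ys)

theorem insertBy_pairwise (x : Int × Int) (ys : List (Int × Int))
    (h : ys.Pairwise (fun a b => pvLexLt b a = false)) :
    (PySem.List.insertBy pvLexLt x ys).Pairwise (fun a b => pvLexLt b a = false) := by
  induction ys with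
  | nil => simp [PySem.List.insertBy]
  | cons y ys ih =>
    rcases List.pairwise_cons.mp h with ⟨hy, hys⟩
    by_cases hxy : pvLexLt x y = true
    · simp only [PySem.List.insertBy, hxy, if_true]
      refine List.pairwise_cons.mpr ⟨?_, h⟩
      intro z hz
      rcases List.mem_cons.mp hz with hz | hz
      · subst hz; exact pvLexLt_asymm hxy
      · cases hcase : pvLexLt z x with
        | false => rfl
        | true =>
          have hzy : pvLexLt z y = true := pvLexLt_trans hcase hxy
          have := hy z hz
          simp_all
    · simp only [PySem.List.insertBy, hxy, if_false, Bool.false_eq_true]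
      refine List.pairwise_cons.mpr ⟨?_, ih hys⟩
      intro z hz
      have hz' := (insertBy_perm x ys).mem_iff.mp hz
      rcases List.mem_cons.mp hz' with hz' | hz'
      · subst hz'
        exact Bool.not_eq_true _ ▸ (Bool.of_not_eq_true hxy)
      · exact hy z hz'

theorem pvSortList_perm (xs : List (Int × Int)) : (pvSortList xs).Perm xs := by
  suffices h : ∀ (xs acc : List (Int × Int)),
      (xs.foldl (fun acc x => PySem.List.insertBy pvLexLt x acc) acc).Perm (acc ++ xs) by
    simpa using h xs []
  intro xs
  induction xs with
  | nil => simp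
  | cons x xs ih =>
    intro acc
    simp only [List.foldl_cons]
    refine List.Perm.trans (ih _) ?_
    refine List.Perm.trans (List.Perm.append_right xs (insertBy_perm x acc)) ?_
    simpa using (List.perm_middle (a := x) (l₁ := acc) (l₂ := xs)).symm

theorem pvSortList_pairwise (xs : List (Int × Int)) :
    (pvSortList xs).Pairwise (fun a b => pvLexLt b a = false) := by
  suffices h : ∀ (xs acc : List (Int × Int)), acc.Pairwise (fun a b => pvLexLt b a = false) →
      (xs.foldl (fun acc x => PySem.List.insertBy pvLexLt x acc) acc).Pairwise
        (fun a b => pvLexLt b a = false) by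
    exact h xs [] (by simp)
  intro xs
  induction xs with
  | nil => intro acc h; simpa using h
  | cons x xs ih => intro acc h; exact ih _ (insertBy_pairwise x acc h)

theorem pairwise_lt_of_pairwise_le {l : List (Int × Int)} (hnd : l.Nodup)
    (h : l.Pairwise (fun a b => pvLexLt b a = false)) :
    l.Pairwise (fun a b => pvLexLt a b = true) := by
  have := List.Pairwise.and hnd h
  refine this.imp ?_
  rintro a b ⟨hne, hle⟩
  rcases pvLexLt_total hne with h' | h'
  · exact h'
  · simp_all

theorem pvSortList_eq_of_perm {l : List (Int × Int)} {xs : List (Int × Int)}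
    (hperm : l.Perm xs) (hl : l.Pairwise (fun a b => pvLexLt b a = false)) :
    pvSortList xs = l := by
  exact List.Perm.eq_of_pairwise (fun a b _ _ hab hba => pvLexLt_antisymm hba hab)
    (pvSortList_pairwise xs) hl ((pvSortList_perm xs).trans hperm.symm)

-- min2? returns the unique minimum
theorem min2?_fold_some (xs : List (Int × Int)) : ∀ m0 : Int × Int,
    ∃ m, xs.foldl (fun acc x => match acc with
          | none => some x
          | some m => if pvLexLt x m then some x else some m) (some m0) = some m ∧
      m ∈ m0 :: xs ∧ ∀ y ∈ m0 :: xs, pvLexLt y m = false := by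
  induction xs with
  | nil =>
    intro m0
    exact ⟨m0, rfl, by simp, by simpa using pvLexLt_irrefl m0⟩
  | cons x xs ih =>
    intro m0
    by_cases hx : pvLexLt x m0 = true
    · rcases ih x with ⟨m, hm, hmem, hmin⟩
      refine ⟨m, by simpa [hx] using hm, ?_, ?_⟩
      · rcases List.mem_cons.mp hmem with h | h
        · exact h ▸ (by simp)
        · simp [h]
      · intro y hy
        rcases List.mem_cons.mp hy with h | h
        · subst h
          cases hcase : pvLexLt y m with
          | false => rfl
          | true =>
            have hx' : pvLexLt x m = false := hmin x (by simp)
            have : pvLexLt x m = true := pvLexLt_trans hx hcase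
            simp_all
        · exact hmin y h
    · rcases ih m0 with ⟨m, hm, hmem, hmin⟩
      have hx' : pvLexLt x m0 = false := by simpa using hx
      refine ⟨m, by simpa [hx'] using hm, ?_, ?_⟩
      · rcases List.mem_cons.mp hmem with h | h
        · simp [h]
        · simp [h]
      · intro y hy
        rcases List.mem_cons.mp hy with h | h
        · exact h ▸ hmin m0 (by simp)
        · rcases List.mem_cons.mp h with h | h
          · subst h
            cases hcase : pvLexLt y m with
            | false => rfl
            | true =>
              have hm0m : pvLexLt m0 m = false := hmin m0 (by simp)
              rcases eq_or_ne y m0 with hym | hym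
              · rw [hym] at hcase; simp_all
              · rcases pvLexLt_total hym with hlt | hlt
                · simp_all
                · have : pvLexLt m0 m = true := pvLexLt_trans hlt hcase
                  simp_all
          · exact hmin y (by simp [h])

theorem min2?_min (xs : List (Int × Int)) (hne : xs ≠ []) :
    ∃ m, PySem.List.min2? xs (fun q => q.1) (fun q => q.2) = some m ∧ m ∈ xs ∧
      ∀ y ∈ xs, pvLexLt y m = false := by
  cases xs with
  | nil => exact absurd rfl hne
  | cons x xs =>
    rcases min2?_fold_some xs x with ⟨m, hm, hmem, hmin⟩
    have heq : PySem.List.min2? (x :: xs) (fun q => q.1) (fun q => q.2) =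
        xs.foldl (fun acc x => match acc with
          | none => some x
          | some m => if pvLexLt x m then some x else some m) (some x) := by
      show (x :: xs).foldl _ none = _
      rw [List.foldl_cons]
      congr 1
      funext acc z
      cases acc with
      | none => rfl
      | some m => simp only [pvLexLt]; rfl
    exact ⟨m, heq.trans hm, hmem, hmin⟩

theorem min2?_eq_head (xs : List (Int × Int)) (m : Int × Int) (rest : List (Int × Int))
    (hs : pvSortList xs = m :: rest) (hnd : xs.Nodup) :
    PySem.List.min2? xs (fun q => q.1) (fun q => q.2) = some m := by
  have hperm := pvSortList_perm xs
  have hne : xs ≠ [] := by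
    intro h; subst h
    simp [pvSortList] at hs
  rcases min2?_min xs hne with ⟨m', hm', hmem', hmin'⟩
  have hnds : (pvSortList xs).Nodup := hperm.nodup_iff.mpr hnd
  have hpw := pairwise_lt_of_pairwise_le hnds (pvSortList_pairwise xs)
  rw [hs] at hpw hperm
  rcases eq_or_ne m' m with h | h
  · rw [hm', h]
  · have hm'rest : m' ∈ rest := by
      have : m' ∈ m :: rest := hperm.symm.subset hmem'
      rcases List.mem_cons.mp this with h' | h'
      · exact absurd h' h
      · exact h'
    have : pvLexLt m m' = true := (List.pairwise_cons.mp hpw).1 m' hm'rest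
    have hmmem : m ∈ xs := hperm.subset (by simp)
    have := hmin' m hmmem
    simp_all

-- the increment loop, elementwise
def pvIncAll (idxs : List Int) (ice : List Int) : List Int :=
  idxs.foldl (fun ic i => PySem.List.pySetD ic i (PySem.List.pyGetD ic i 0 + 1)) ice

theorem pvIncAll_length (idxs : List Int) (ice : List Int) :
    (pvIncAll idxs ice).length = ice.length := by
  induction idxs generalizing ice with
  | nil => rfl
  | cons i idxs ih =>
    simp only [pvIncAll, List.foldl_cons]
    rw [show ∀ ic, idxs.foldl (fun ic i => PySem.List.pySetD ic i (PySem.List.pyGetD ic i 0 + 1)) ic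
        = pvIncAll idxs ic from fun _ => rfl]
    rw [ih, PySem.List.length_pySetD]

theorem pvIncAll_getD (idxs : List Int) (ice : List Int)
    (hb : ∀ i ∈ idxs, 0 ≤ i ∧ i.toNat < ice.length) (hnd : idxs.Nodup) :
    ∀ j : Nat, j < ice.length →
      PySem.List.pyGetD (pvIncAll idxs ice) (j : Int) 0 =
        PySem.List.pyGetD ice (j : Int) 0 + (if (j : Int) ∈ idxs then 1 else 0) := by
  induction idxs generalizing ice with
  | nil => intro j hj; simp [pvIncAll]
  | cons i idxs ih =>
    intro j hj
    rcases hb i (by simp) with ⟨hi0, hilen⟩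
    have hfold : pvIncAll (i :: idxs) ice =
        pvIncAll idxs (PySem.List.pySetD ice i (PySem.List.pyGetD ice i 0 + 1)) := rfl
    rcases List.nodup_cons.mp hnd with ⟨hinot, hnd'⟩
    set ice' := PySem.List.pySetD ice i (PySem.List.pyGetD ice i 0 + 1) with hice'
    have hlen' : ice'.length = ice.length := PySem.List.length_pySetD ice i _
    have hb' : ∀ i' ∈ idxs, 0 ≤ i' ∧ i'.toNat < ice'.length := by
      intro i' hi'
      rcases hb i' (by simp [hi']) with ⟨h1, h2⟩
      exact ⟨h1, hlen' ▸ h2⟩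
    have hcast : i = ((i.toNat : Nat) : Int) := by omega
    have hsetD : ∀ (m : Nat), m < ice.length → PySem.List.pyGetD ice' (m : Int) 0 =
        if m = i.toNat then PySem.List.pyGetD ice (m : Int) 0 + 1
        else PySem.List.pyGetD ice (m : Int) 0 := by
      intro m hm
      have h := PySem.List.pyGetD_pySetD_natCast ice i.toNat m (PySem.List.pyGetD ice i 0 + 1) 0 hilen
      rw [← hcast] at h
      rw [hice', h]
      by_cases hmi : m = i.toNat
      · have hmI : (m : Int) = i := by omega
        rw [if_pos hmi, if_pos hmi, hmI]
      · rw [if_neg hmi, if_neg hmi]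
    rw [hfold, ih ice' hb' hnd' j (hlen' ▸ hj), hsetD j hj]
    by_cases hji : j = i.toNat
    · have hjI : (j : Int) = i := by omega
      have hjnot : (j : Int) ∉ idxs := by rw [hjI]; exact hinot
      have hjmem : (j : Int) ∈ i :: idxs := by rw [hjI]; exact List.mem_cons_self ..
      rw [if_pos hji, if_neg hjnot, if_pos hjmem]; ring
    · have hjI : (j : Int) ≠ i := by omega
      have hiff : ((j : Int) ∈ i :: idxs) ↔ ((j : Int) ∈ idxs) := by
        constructor
        · intro h
          rcases List.mem_cons.mp h with h | h
          · exact absurd h hjI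
          · exact h
        · exact fun h => List.mem_cons_of_mem i h
      rw [if_neg hji]
      by_cases hjm : (j : Int) ∈ idxs
      · rw [if_pos hjm, if_pos (hiff.mpr hjm)]
      · rw [if_neg hjm, if_neg (fun h => hjm (hiff.mp h))]

-- the pop loop equals incrementing along the sorted order
theorem pop_loop_eq (l : List Int) (pq : List (Int × Int)) (ice : List Int)
    (hnd : pq.Nodup) (hk : l.length ≤ pq.length) :
    (l.foldl pvPopStep (pq, ice)).2 = pvIncAll (((pvSortList pq).take l.length).map (fun q => q.2)) ice := by
  induction l generalizing pq ice with
  | nil => rfl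
  | cons c l ih =>
    have hne : pq ≠ [] := by
      intro h; subst h; simp at hk
    have hsne : pvSortList pq ≠ [] := by
      intro h
      have h2 : ([] : List (Int × Int)).Perm pq := h ▸ pvSortList_perm pq
      exact hne h2.nil_eq.symm
    rcases hs : pvSortList pq with _ | ⟨m, rest⟩
    · exact absurd hs hsne
    have hmin := min2?_eq_head pq m rest hs hnd
    have hstep : pvPopStep (pq, ice) c =
        (pq.erase m, PySem.List.pySetD ice m.2 (PySem.List.pyGetD ice m.2 0 + 1)) := by
      simp only [pvPopStep, hmin]
    have hperm' : pq.Perm (m :: rest) := by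
      have := pvSortList_perm pq; rw [hs] at this; exact this.symm
    have hmem : m ∈ pq := hperm'.symm.subset (by simp)
    have herase : (pq.erase m).Perm rest := by
      have := hperm'.erase m
      rwa [List.erase_cons_head] at this
    have hnd2 : (pq.erase m).Nodup := hnd.erase m
    have hrest_pw : rest.Pairwise (fun a b => pvLexLt b a = false) := by
      have := pvSortList_pairwise pq; rw [hs] at this
      exact (List.pairwise_cons.mp this).2
    have hsort' : pvSortList (pq.erase m) = rest := pvSortList_eq_of_perm herase.symm hrest_pw
    have hlen : l.length ≤ (pq.erase m).length := by
      have := List.length_erase_of_mem hmem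
      simp only [List.length_cons] at hk
      omega
    have := ih (pq.erase m) (PySem.List.pySetD ice m.2 (PySem.List.pyGetD ice m.2 0 + 1)) hnd2 hlen
    rw [List.foldl_cons, hstep, this, hsort']
    simp only [List.length_cons, List.take_succ_cons, List.map_cons]
    rfl

-- A's swapped enumerate equals B's zip with a range
theorem pairs_eq_aux (ps : List Int) : ∀ s : Int,
    (PySem.List.enumerate ps s).map (fun ip => (ip.2, ip.1)) =
      ps.zip (PySem.List.pyRange s (s + (ps.length : Int)) 1) := by
  induction ps with
  | nil => intro s; simp [PySem.List.enumerate_nil]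
  | cons x xs ih =>
    intro s
    have hceq : s + ((x :: xs).length : Int) = (s + 1) + (xs.length : Int) := by
      simp only [List.length_cons]
      omega
    rw [PySem.List.enumerate_cons,
      PySem.List.pyRange_one_cons (a := s) (b := s + ((x :: xs).length : Int))
        (by omega), hceq]
    simp only [List.map_cons, List.zip_cons_cons]
    rw [ih (s + 1)]

theorem pairs_eq (ps : List Int) :
    (PySem.List.enumerate ps 0).map (fun ip => (ip.2, ip.1)) =
      ps.zip (PySem.List.pyRange 0 (ps.length : Int) 1) := by
  have := pairs_eq_aux ps 0
  rwa [zero_add] at this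

-- any element of the first k of the sorted order has fewer than k strictly smaller elements
theorem countP_lt_of_mem_take (pairs : List (Int × Int)) (hnd : pairs.Nodup) (k : Nat)
    (q : Int × Int) (hq : q ∈ (pvSortList pairs).take k) :
    pairs.countP (fun q' => pvLexLt q' q) < k := by
  set s := pvSortList pairs with hsdef
  have hnds : s.Nodup := (pvSortList_perm pairs).nodup_iff.mpr hnd
  have hpw := pairwise_lt_of_pairwise_le hnds (pvSortList_pairwise pairs)
  rw [List.mem_take_iff_getElem] at hq
  rcases hq with ⟨i, hi, hiq⟩
  have hik : i < k := lt_of_lt_of_le hi (min_le_left _ _)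
  have hilen : i < s.length := lt_of_lt_of_le hi (min_le_right _ _)
  have hpw' := List.pairwise_iff_getElem.mp hpw
  have hsplit : s = s.take i ++ s[i] :: s.drop (i + 1) := by
    rw [← List.drop_eq_getElem_cons hilen, List.take_append_drop]
  have hcount : s.countP (fun q' => pvLexLt q' q) = i := by
    conv_lhs => rw [hsplit]
    rw [List.countP_append, List.countP_cons]
    have h1 : (s.take i).countP (fun q' => pvLexLt q' q) = i := by
      have : (s.take i).countP (fun q' => pvLexLt q' q) = (s.take i).length := by
        rw [List.countP_eq_length]
        intro x hx
        rw [List.mem_take_iff_getElem] at hx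
        rcases hx with ⟨j, hj, hjx⟩
        have hj1 : j < i := lt_of_lt_of_le hj (min_le_left _ _)
        have hj2 : j < s.length := lt_of_lt_of_le hj (min_le_right _ _)
        have := hpw' j i hj2 hilen hj1
        rw [hjx, hiq] at this
        simpa using this
      rw [this, List.length_take]
      omega
    have h2 : (pvLexLt s[i] q : Bool) = false := by rw [hiq]; exact pvLexLt_irrefl q
    have h3 : (s.drop (i + 1)).countP (fun q' => pvLexLt q' q) = 0 := by
      rw [List.countP_eq_zero]
      intro x hx
      rw [List.mem_iff_getElem] at hx
      rcases hx with ⟨j, hj, hjx⟩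
      have hlen : i + 1 + j < s.length := by
        rw [List.length_drop] at hj; omega
      have hgd : (s.drop (i + 1))[j] = s[i + 1 + j] := by
        rw [List.getElem_drop]
      have := hpw' i (i + 1 + j) hilen hlen (by omega)
      rw [hiq, ← hgd, hjx] at this
      simp [pvLexLt_asymm this]
    rw [h1, h2, h3]
    simp
  have := (pvSortList_perm pairs).countP_eq (fun q' => pvLexLt q' q)
  rw [← hsdef] at this
  omega

-- ===== VERDICT (by name: the statement is the Claim_ definition above) =====
theorem distribute_ice_creams_with_priority_spec : Claim_equal_distribute_ice_creams_with_priority := by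
  intro t n ps _ hpre
  rcases hpre with ⟨hn0, himp⟩
  unfold Spec_distribute_ice_creams_with_priority
  have hdm : PySem.Int.divmod? t n = some (PySem.Int.floordiv t n, PySem.Int.mod t n) := by
    simp [PySem.Int.divmod?, hn0, PySem.Int.floordiv, PySem.Int.mod]
  rcases lt_or_gt_of_ne hn0 with hneg | hpos
  · -- num_users < 0 : both sides are []
    have hr : PySem.Int.mod t n ≤ 0 := (PySem.Int.mod_neg_bounds t hneg).2
    simp only [distribute_ice_creams_with_priority, distribute_ice_creams_with_priority_alt]
    rw [hdm]
    rw [PySem.List.pyRange_one_eq_nil hr, PySem.List.pyRange_one_eq_nil (le_of_lt hneg)]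
    simp [PySem.List.pyRepeat_singleton, Int.toNat_of_nonpos (le_of_lt hneg)]
  · -- num_users > 0
    set r := PySem.Int.mod t n with hrdef
    set base := PySem.Int.floordiv t n with hbdef
    rcases himp hpos with ⟨hrlen, hrank⟩
    have hr0 : 0 ≤ r := PySem.Int.mod_nonneg t hpos
    set pairs := ps.zip (PySem.List.pyRange 0 (ps.length : Int) 1) with hpairs
    have hplen : pairs.length = ps.length := by
      rw [hpairs, List.length_zip, PySem.List.length_pyRange_one]
      simp
    have hsnd : pairs.map Prod.snd = PySem.List.pyRange 0 (ps.length : Int) 1 := by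
      rw [hpairs]
      exact List.map_snd_zip (by rw [PySem.List.length_pyRange_one]; simp)
    have hnd : pairs.Nodup := by
      refine List.Nodup.of_map Prod.snd ?_
      rw [hsnd]; exact PySem.List.nodup_pyRange_one 0 _
    set s := pvSortList pairs with hsdef
    set idxs := (s.take r.toNat).map (fun q => q.2) with hidxs
    set ice := List.replicate n.toNat base with hice
    -- A's side reduces to pvIncAll idxs ice
    have hA : distribute_ice_creams_with_priority t n ps = pvIncAll idxs ice := by
      simp only [distribute_ice_creams_with_priority]
      rw [pairs_eq ps, ← hpairs, ← hrdef, ← hbdef]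
      rw [PySem.List.pyRepeat_singleton, ← hice]
      rw [pop_loop_eq _ pairs ice hnd (by rw [PySem.List.length_pyRange_one, hplen]; omega)]
      rw [PySem.List.length_pyRange_one, ← hsdef]
      simp [hidxs]
    -- properties of idxs
    have hmem_pairs : ∀ q ∈ s.take r.toNat, q ∈ pairs := fun q hq =>
      (pvSortList_perm pairs).subset (List.mem_of_mem_take hq)
    have hsnd_bounds : ∀ q ∈ pairs, 0 ≤ q.2 ∧ q.2 < (ps.length : Int) := by
      intro q hq
      rcases q with ⟨q1, q2⟩
      have := (List.of_mem_zip hq).2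
      rw [PySem.List.mem_pyRange_one] at this
      simpa using this
    have hq_lt_n : ∀ q ∈ s.take r.toNat, q.2 < n := by
      intro q hq
      by_contra hge
      have h1 := hrank q (hmem_pairs q hq) (le_of_not_gt hge)
      have h2 := countP_lt_of_mem_take pairs hnd r.toNat q hq
      omega
    have hb : ∀ i ∈ idxs, 0 ≤ i ∧ i.toNat < ice.length := by
      intro i hi
      rw [hidxs, List.mem_map] at hi
      rcases hi with ⟨q, hq, hqi⟩
      have h1 := (hsnd_bounds q (hmem_pairs q hq)).1
      have h2 := hq_lt_n q hq
      rw [hice, List.length_replicate]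
      subst hqi
      constructor
      · exact h1
      · omega
    have hnd_idxs : idxs.Nodup := by
      have hmsnd : (s.map Prod.snd).Nodup := by
        have hperm : (s.map Prod.snd).Perm (pairs.map Prod.snd) := (pvSortList_perm pairs).map Prod.snd
        rw [hsnd] at hperm
        exact hperm.nodup_iff.mpr (PySem.List.nodup_pyRange_one 0 _)
      have heq : idxs = (s.map Prod.snd).take r.toNat := by
        rw [hidxs, List.map_take]
      rw [heq]
      exact hmsnd.sublist (List.take_sublist _ _)
    -- B's side
    have hB : distribute_ice_creams_with_priority_alt t n ps =
        (PySem.List.pyRange 0 n 1).map (fun i =>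
          if PySem.Set.contains (PySem.Set.ofList idxs) i then base + 1 else base) := by
      simp only [distribute_ice_creams_with_priority_alt]
      rw [hdm]
      simp only [← hpairs]
      rw [sorted2_eq_pvSortList, ← hsdef, PySem.List.slice_to s hr0, ← hidxs]
    rw [hA, hB]
    -- pointwise comparison
    have hicelen : ice.length = n.toNat := by rw [hice, List.length_replicate]
    apply List.ext_getElem
    · rw [pvIncAll_length, hicelen, List.length_map, PySem.List.length_pyRange_one]
      simp
    · intro j hj1 hj2
      have hjlt : j < ice.length := by
        rw [pvIncAll_length] at hj1; exact hj1
      have hjn : (j : Int) < n := by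
        rw [hicelen] at hjlt; omega
      have hL : (pvIncAll idxs ice)[j] = PySem.List.pyGetD (pvIncAll idxs ice) (j : Int) 0 := by
        rw [PySem.List.pyGetD_eq_getElem _ 0 (by omega) (by rw [pvIncAll_length]; exact_mod_cast hjlt)]
        simp
      rw [hL, pvIncAll_getD idxs ice hb hnd_idxs j hjlt]
      have hiceval : PySem.List.pyGetD ice (j : Int) 0 = base := by
        rw [PySem.List.pyGetD_eq_getElem _ 0 (by omega) (by exact_mod_cast hjlt)]
        simp [hice]
      rw [hiceval]
      rw [List.getElem_map, PySem.List.getElem_pyRange_one]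
      rw [zero_add]
      have hcont : PySem.Set.contains (PySem.Set.ofList idxs) (j : Int) = true ↔ (j : Int) ∈ idxs := by
        rw [PySem.Set.contains, List.contains_iff_mem]
        exact PySem.Set.mem_ofList idxs (j : Int)
      by_cases hmem : (j : Int) ∈ idxs
      · rw [if_pos hmem, if_pos (hcont.mpr hmem)]
      · rw [if_neg hmem, if_neg (fun h => hmem (hcont.mp h))]
        ring
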